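-- pv_equiv track=rewrite | github.com/Serio120/LetCode | ♦♦2370-LongestIdealSubsequence.py | longestIdealString
-- ===== SOURCE A (Python) =====
-- def longestIdealString(s: str, k: int) -> int:
--     n = len(s)
--     dp = [0] * n
--     last_occurrence = [-1] * 26
--
--     for i in range(n):
--         dp[i] = 1
--         for j in range(max(0, ord(s[i]) - ord('a') - k), min(26, ord(s[i]) - ord('a') + k + 1)):
--             if last_occurrence[j] != -1:
--                 dp[i] = max(dp[i], dp[last_occurrence[j]] + 1)
--         last_occurrence[ord(s[i]) - ord('a')] = i
--
--     return max(dp)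
-- ===== SOURCE B (Python) =====
-- def longestIdealString(s: str, k: int) -> int:
--     # bottom-up take/skip DP over suffixes: g[last] = longest ideal subsequence of the
--     # processed suffix whose first char may follow letter `last` (index 26 = no previous char)
--     g = [0] * 27
--     for c in reversed(s):
--         ci = ord(c) - ord('a')
--         take = 1 + g[ci]
--         for last in range(27):
--             if last == 26 or abs(last - ci) <= k:
--                 if take > g[last]:
--                     g[last] = take
--     return g[26]
-- ===== Notes on version B (the rewrite author's own statement) =====
-- stated objective: alternative
-- what changed: Replaces A's forward DP (per-position dp[n] array plus a last_occurrence[26] index table, each char taking 1 + a window-read maximum over previously seen letters) with a backward take/skip suffix DP: a single 27-entry state vector g where g[last] is the longest ideal subsequence of the processed suffix allowed to follow previous letter `last` (27th entry = no previous char); each char read once (take = 1 + g[c]) and written into the window of compatible states; the dp[n] and last_occurrence arrays disappear and the answer is read off g[26].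
-- outside the precondition, e.g. on longestIdealString('khNxmM', 5): A returns 2, B returns 3; on longestIdealString('', 0): A raises ValueError, B returns 0
import Mathlib
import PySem

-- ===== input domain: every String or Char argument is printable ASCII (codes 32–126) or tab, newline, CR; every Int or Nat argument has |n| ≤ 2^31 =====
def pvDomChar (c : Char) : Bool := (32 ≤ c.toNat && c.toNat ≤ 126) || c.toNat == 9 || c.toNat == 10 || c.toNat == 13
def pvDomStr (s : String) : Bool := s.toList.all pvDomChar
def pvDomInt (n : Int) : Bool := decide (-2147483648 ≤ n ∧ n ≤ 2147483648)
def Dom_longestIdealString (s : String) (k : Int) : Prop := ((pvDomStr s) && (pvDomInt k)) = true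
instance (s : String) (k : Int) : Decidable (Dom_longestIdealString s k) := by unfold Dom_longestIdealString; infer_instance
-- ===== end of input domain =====

-- B replaces A's forward DP (dp[n] array + last_occurrence[26] index table, window-READ max per
-- char) with a backward take/skip suffix DP over a single 27-entry state vector (objective:
-- alternative); return value only — neither version mutates its arguments.

-- ===== PORT A =====
-- inner loop body: 'if last_occurrence[j] != -1: dp[i] = max(dp[i], dp[last_occurrence[j]] + 1)'
def pvInnerA (i : Int) (last : List Int) (dp : List Int) (j : Int) : List Int :=
  if PySem.List.pyGetD last j 0 ≠ -1 then
    PySem.List.pySetD dp i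
      (max (PySem.List.pyGetD dp i 0)
           (PySem.List.pyGetD dp (PySem.List.pyGetD last j 0) 0 + 1))
  else dp

-- outer loop body over i, state (dp, last_occurrence)
def pvStepA (l : List Char) (k : Int) (st : List Int × List Int) (i : Int) : List Int × List Int :=
  let ci : Int := ((PySem.List.pyGetD l i ' ').toNat : Int) - 97
  let dp1 := PySem.List.pySetD st.1 i 1
  let dp2 := (PySem.List.pyRange (max 0 (ci - k)) (min 26 (ci + k + 1)) 1).foldl (pvInnerA i st.2) dp1
  (dp2, PySem.List.pySetD st.2 ci i)

def longestIdealString (s : String) (k : Int) : Int :=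
  let n := s.toList.length
  let st := (PySem.List.pyRange 0 (n : Int) 1).foldl (pvStepA s.toList k)
              (List.replicate n 0, List.replicate 26 (-1))
  (PySem.List.max? st.1 (fun x => x)).getD 0

-- ===== PORT B =====
-- inner loop body: 'if last == 26 or abs(last - ci) <= k: g[last] = take if take > g[last] else g[last]'
def pvInnerB (k ci take : Int) (g : List Int) (last : Int) : List Int :=
  if last == 26 || decide (|last - ci| ≤ k) then
    (if take > PySem.List.pyGetD g last 0 then PySem.List.pySetD g last take else g)
  else g

-- outer loop body: one char of reversed(s)
def pvStepBalt (k : Int) (g : List Int) (c : Char) : List Int :=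
  let ci : Int := ((c.toNat : Int)) - 97
  let take := 1 + PySem.List.pyGetD g ci 0
  (PySem.List.pyRange 0 27 1).foldl (pvInnerB k ci take) g

def longestIdealString_alt (s : String) (k : Int) : Int :=
  let g := s.toList.reverse.foldl (pvStepBalt k) (List.replicate 27 0)
  PySem.List.pyGetD g 26 0

-- ===== PRECONDITION & SPEC =====
-- Pre_ restricts to the problem's natural domain, nonempty strings of lowercase letters
-- (LeetCode 2370: 's consists of lowercase English letters'): outside it A either raises
-- (ValueError on "", IndexError for char codes < 71 or > 122) or, for codes 71..96, returns
-- accidental values produced by negative-index wraparound of last_occurrence.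
def Pre_longestIdealString (s : String) (k : Int) : Prop :=
  s.toList.isEmpty = false ∧ s.toList.all (fun c => 97 ≤ c.toNat && c.toNat ≤ 122) = true
instance (s : String) (k : Int) : Decidable (Pre_longestIdealString s k) := by
  unfold Pre_longestIdealString; infer_instance
def pvWitness_longestIdealString : String × Int := ("ab", 1)

def Spec_longestIdealString (s : String) (k : Int) (out : Int) : Prop :=
  out = longestIdealString_alt s k
instance (s : String) (k : Int) (out : Int) : Decidable (Spec_longestIdealString s k out) := by
  unfold Spec_longestIdealString; infer_instance

-- ===== CLAIM (what is proved, stated in full; the proofs are below) =====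
def Claim_equal_longestIdealString : Prop :=
  ∀ (s : String) (k : Int), Dom_longestIdealString s k → Pre_longestIdealString s k →
    Spec_longestIdealString s k (longestIdealString s k)

-- ===== LEMMAS AND PROOFS =====

-- the common mathematical value: take/skip recursion on the suffix, `last` = previous letter code
def pvOk (k : Int) (last : Option Nat) (c : Nat) : Bool :=
  match last with
  | none => true
  | some l => decide (|((l : Int)) - ((c : Int))| ≤ k)

def pvF (k : Int) : List Nat → Option Nat → Int
  | [], _ => 0
  | c :: t, last =>
    if pvOk k last c then max (1 + pvF k t (some c)) (pvF k t last)
    else pvF k t last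

theorem pvF_cons_none (k : Int) (c : Nat) (t : List Nat) :
    pvF k (c :: t) none = max (1 + pvF k t (some c)) (pvF k t none) := by
  simp [pvF, pvOk]

theorem pvF_cons_some (k : Int) (c l : Nat) (t : List Nat) :
    pvF k (c :: t) (some l) =
      if |((l : Int)) - ((c : Int))| ≤ k then max (1 + pvF k t (some c)) (pvF k t (some l))
      else pvF k t (some l) := by
  simp only [pvF, pvOk]
  split_ifs with h1 h2 h2 <;> simp_all

theorem pvF_nonneg (k : Int) (t : List Nat) (last : Option Nat) : 0 ≤ pvF k t last := by
  induction t generalizing last with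
  | nil => simp [pvF]
  | cons c t ih =>
    simp only [pvF]
    split_ifs
    · have := ih (some c); omega
    · exact ih last

theorem pvF_le_none (k : Int) (t : List Nat) (j : Nat) :
    pvF k t (some j) ≤ pvF k t none := by
  induction t generalizing j with
  | nil => simp [pvF]
  | cons c t ih =>
    rw [pvF_cons_some, pvF_cons_none]
    split_ifs
    · exact max_le_max le_rfl (ih j)
    · exact le_max_of_le_right (ih j)

theorem pvF_cons_le (k : Int) (c : Nat) (t : List Nat) (last : Option Nat) :
    pvF k t last ≤ pvF k (c :: t) last := by
  simp only [pvF]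
  split_ifs
  · exact le_max_right _ _
  · exact le_rfl

theorem pvF_neg_some (k : Int) (hk : k < 0) (t : List Nat) (j : Nat) :
    pvF k t (some j) = 0 := by
  induction t generalizing j with
  | nil => simp [pvF]
  | cons c t ih =>
    rw [pvF_cons_some, if_neg (by have := abs_nonneg (((j:Int)) - ((c:Int))); omega)]
    exact ih j

-- max over the 26-letter table
def pvRmax (n : Nat) (f : Nat → Int) : Int := ((List.range n).map f).foldl max 0

theorem pvRmax_nonneg (n : Nat) (f : Nat → Int) : 0 ≤ pvRmax n f :=
  (PySem.List.le_foldl_max _ 0).1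

theorem pv_foldl_max_le (t : List Int) (a b : Int) (h1 : a ≤ b) (h2 : ∀ y ∈ t, y ≤ b) :
    t.foldl max a ≤ b := by
  induction t generalizing a with
  | nil => exact h1
  | cons x xs ih =>
    simp only [List.foldl_cons]
    exact ih (max a x) (max_le h1 (h2 x (by simp))) (fun y hy => h2 y (by simp [hy]))

theorem pvRmax_le (n : Nat) (f : Nat → Int) (M : Int) (h0 : 0 ≤ M)
    (h : ∀ j, j < n → f j ≤ M) : pvRmax n f ≤ M := by
  apply pv_foldl_max_le _ _ _ h0
  intro y hy
  obtain ⟨j, hj, rfl⟩ := List.mem_map.mp hy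
  exact h j (List.mem_range.mp hj)

theorem pvle_rmax (n : Nat) (f : Nat → Int) (j : Nat) (h : j < n) : f j ≤ pvRmax n f :=
  (PySem.List.le_foldl_max _ 0).2 _ (List.mem_map.mpr ⟨j, List.mem_range.mpr h, rfl⟩)

theorem pvRmax_congr (n : Nat) (f g : Nat → Int) (h : ∀ j, j < n → f j = g j) :
    pvRmax n f = pvRmax n g := by
  unfold pvRmax
  congr 1
  apply List.map_congr_left
  intro j hj
  exact h j (List.mem_range.mp hj)

theorem pvRmax_update (n : Nat) (f f' : Nat → Int) (c : Nat) (v : Int) (hc : c < n)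
    (hv0 : 0 ≤ v) (hf' : ∀ j, j < n → f' j = if j = c then v else f j) (hcv : f c ≤ v)
    (hnn : ∀ j, j < n → 0 ≤ f j) : pvRmax n f' = max (pvRmax n f) v := by
  apply le_antisymm
  · apply pvRmax_le _ _ _ (le_max_of_le_right hv0)
    intro j hj
    rw [hf' j hj]
    split_ifs
    · exact le_max_right _ _
    · exact le_max_of_le_left (pvle_rmax n f j hj)
  · apply max_le
    · apply pvRmax_le _ _ _ (pvRmax_nonneg n f')
      intro j hj
      by_cases hjc : j = c
      · subst hjc
        calc f j ≤ v := hcv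
          _ = f' j := by rw [hf' j hj]; simp
          _ ≤ pvRmax n f' := pvle_rmax n f' j hj
      · calc f j = f' j := by rw [hf' j hj, if_neg hjc]
          _ ≤ pvRmax n f' := pvle_rmax n f' j hj
    · calc v = f' c := by rw [hf' c hc]; simp
        _ ≤ pvRmax n f' := pvle_rmax n f' c hc

-- the abstract forward step (A's per-letter table, window-read max)
def pvW (k : Int) (T : List Int) (c : Nat) : Int :=
  ((PySem.List.pyRange (max 0 ((c : Int) - k)) (min 26 ((c : Int) + k + 1)) 1).map
    (fun j => PySem.List.pyGetD T j 0)).foldl max 0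

def pvTStep (k : Int) (T : List Int) (c : Nat) : List Int := T.set c (1 + pvW k T c)

theorem pvW_nonneg (k : Int) (T : List Int) (c : Nat) : 0 ≤ pvW k T c :=
  (PySem.List.le_foldl_max _ 0).1

theorem pv_mem_window (k : Int) (c : Nat) (hc : c < 26) (j : Int) :
    j ∈ PySem.List.pyRange (max 0 ((c : Int) - k)) (min 26 ((c : Int) + k + 1)) 1 ↔
      0 ≤ j ∧ j < 26 ∧ |j - (c : Int)| ≤ k := by
  rw [PySem.List.mem_pyRange_one]
  constructor <;> intro h
  · refine ⟨?_, ?_, ?_⟩ <;> [skip; skip; rw [abs_le]] <;> omega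
  · rw [abs_le] at h
    constructor <;> omega

theorem pv_window_le (k : Int) (T : List Int) (c : Nat) (hc : c < 26) (j : Nat) (hj : j < 26)
    (hok : |((j : Int)) - ((c : Int))| ≤ k) : T.getD j 0 ≤ pvW k T c := by
  apply (PySem.List.le_foldl_max _ 0).2
  apply List.mem_map.mpr
  refine ⟨(j : Int), (pv_mem_window k c hc _).mpr ⟨by omega, by omega, hok⟩, ?_⟩
  simp [PySem.List.pyGetD_natCast]

theorem pvW_cases (k : Int) (T : List Int) (c : Nat) (hc : c < 26) :
    pvW k T c = 0 ∨ ∃ j : Nat, j < 26 ∧ |((j : Int)) - ((c : Int))| ≤ k ∧ pvW k T c = T.getD j 0 := by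
  rcases PySem.List.foldl_max_mem
      ((PySem.List.pyRange (max 0 ((c : Int) - k)) (min 26 ((c : Int) + k + 1)) 1).map
        (fun j => PySem.List.pyGetD T j 0)) 0 with h | h
  · exact Or.inl h
  · obtain ⟨j, hjW, hje⟩ := List.mem_map.mp h
    obtain ⟨h0, h26, hok⟩ := (pv_mem_window k c hc j).mp hjW
    refine Or.inr ⟨j.toNat, by omega, ?_, ?_⟩
    · rw [show ((j.toNat : Nat) : Int) = j by omega]; exact hok
    · rw [show j = ((j.toNat : Nat) : Int) by omega, PySem.List.pyGetD_natCast] at hje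
      exact hje.symm

theorem pvW_neg (k : Int) (hk : k < 0) (T : List Int) (c : Nat) : pvW k T c = 0 := by
  unfold pvW
  rw [PySem.List.pyRange_one_eq_nil (by omega)]
  simp

theorem pvW_Tc_le (k : Int) (T : List Int) (c : Nat) (hc : c < 26)
    (h1 : k < 0 → ∀ j, j < 26 → T.getD j 0 ≤ 1) : T.getD c 0 ≤ 1 + pvW k T c := by
  by_cases hk : 0 ≤ k
  · have := pv_window_le k T c hc c hc (by simpa using hk)
    omega
  · have := h1 (by omega) c hc
    have := pvW_nonneg k T c
    omega

-- forward fold = backward recursion (the exchange lemma)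
theorem pv_exchange (k : Int) (cs : List Nat) (hcs : ∀ c ∈ cs, c < 26) :
    ∀ (T : List Int), T.length = 26 → (∀ j, j < 26 → 0 ≤ T.getD j 0) →
      (k < 0 → ∀ j, j < 26 → T.getD j 0 ≤ 1) →
      pvRmax 26 (fun j => (cs.foldl (pvTStep k) T).getD j 0) =
        max (pvRmax 26 (fun j => T.getD j 0 + pvF k cs (some j))) (pvF k cs none) := by
  induction cs with
  | nil =>
    intro T hlen hnn h1
    simp only [List.foldl_nil]
    rw [pvRmax_congr 26 (fun j => T.getD j 0 + pvF k [] (some j)) (fun j => T.getD j 0)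
      (by intro j hj; simp [pvF])]
    simp only [pvF]
    exact (max_eq_left (pvRmax_nonneg _ _)).symm
  | cons c cs ih =>
    intro T hlen hnn h1
    have hc : c < 26 := hcs c (by simp)
    have hcs' : ∀ x ∈ cs, x < 26 := fun x hx => hcs x (by simp [hx])
    have hWnn : 0 ≤ pvW k T c := pvW_nonneg k T c
    have hT'len : (pvTStep k T c).length = 26 := by simp [pvTStep, hlen]
    have hT'get : ∀ j, j < 26 → (pvTStep k T c).getD j 0 =
        if j = c then 1 + pvW k T c else T.getD j 0 := by
      intro j hj
      simp only [pvTStep]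
      by_cases hjc : j = c
      · subst hjc; simp [List.getD, List.getElem?_set_self (by omega : j < T.length)]
      · rw [if_neg hjc]
        simp [List.getD, List.getElem?_set_ne (by omega : c ≠ j)]
    set Wv := pvW k T c with hWvdef
    set T' := pvTStep k T c with hT'def
    have hT'nn : ∀ j, j < 26 → 0 ≤ T'.getD j 0 := by
      intro j hj
      rw [hT'get j hj]
      split_ifs
      · omega
      · exact hnn j hj
    have hT'le1 : k < 0 → ∀ j, j < 26 → T'.getD j 0 ≤ 1 := by
      intro hk j hj
      rw [hT'get j hj]
      split_ifs
      · rw [hWvdef, pvW_neg k hk]; omega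
      · exact h1 hk j hj
    have hTcle : T.getD c 0 ≤ 1 + Wv := pvW_Tc_le k T c hc h1
    simp only [List.foldl_cons]
    rw [← hT'def, ih hcs' T' hT'len hT'nn hT'le1]
    set A1 := pvRmax 26 (fun j => T'.getD j 0 + pvF k cs (some j)) with hA1def
    set B1 := pvF k cs none with hB1def
    set A2 := pvRmax 26 (fun j => T.getD j 0 + pvF k (c :: cs) (some j)) with hA2def
    have hB1nn : 0 ≤ B1 := pvF_nonneg k cs none
    have hT'c : T'.getD c 0 = 1 + Wv := by rw [hT'get c hc]; simp
    have hcA1 : (1 + Wv) + pvF k cs (some c) ≤ A1 := by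
      have h : T'.getD c 0 + pvF k cs (some c) ≤ A1 := pvle_rmax 26 _ c hc
      rw [hT'c] at h
      exact h
    apply le_antisymm
    · apply max_le
      · apply pvRmax_le _ _ _ (le_max_of_le_right (le_max_of_le_right hB1nn))
        intro j hj
        rw [hT'get j hj]
        by_cases hjc : j = c
        · subst hjc
          rw [if_pos rfl]
          rcases pvW_cases k T j hc with h0 | ⟨j0, hj0, hok0, he0⟩
          · apply le_max_of_le_right
            have h2 := le_max_left (1 + pvF k cs (some j)) B1
            have hW0 : Wv = 0 := hWvdef.trans h0
            omega
          · apply le_max_of_le_left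
            have hW0 : Wv = T.getD j0 0 := hWvdef.trans he0
            have hterm : T.getD j0 0 + pvF k (j :: cs) (some j0) ≤ A2 := pvle_rmax 26 _ j0 hj0
            rw [pvF_cons_some, if_pos hok0] at hterm
            have := le_max_left (1 + pvF k cs (some j)) (pvF k cs (some j0))
            omega
        · rw [if_neg hjc]
          apply le_max_of_le_left
          have hterm : T.getD j 0 + pvF k (c :: cs) (some j) ≤ A2 := pvle_rmax 26 _ j hj
          have := pvF_cons_le k c cs (some j)
          omega
      · apply le_max_of_le_right
        exact pvF_cons_le k c cs none
    · apply max_le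
      · apply pvRmax_le _ _ _ (le_max_of_le_right hB1nn)
        intro j hj
        rw [pvF_cons_some]
        by_cases hok : |((j : Int)) - ((c : Int))| ≤ k
        · rw [if_pos hok]
          have hjW : T.getD j 0 ≤ Wv := by
            rw [hWvdef]; exact pv_window_le k T c hc j hj hok
          apply le_max_of_le_left
          rcases max_cases (1 + pvF k cs (some c)) (pvF k cs (some j)) with ⟨he, _⟩ | ⟨he, _⟩
          · rw [he]; omega
          · rw [he]
            by_cases hjc : j = c
            · subst hjc
              have := pvF_nonneg k cs (some j)
              omega
            · have hterm : T'.getD j 0 + pvF k cs (some j) ≤ A1 := pvle_rmax 26 _ j hj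
              rw [hT'get j hj, if_neg hjc] at hterm
              exact hterm
        · rw [if_neg hok]
          apply le_max_of_le_left
          by_cases hjc : j = c
          · subst hjc
            have hk : k < 0 := by
              by_contra hk0
              exact hok (by simpa using (by omega : (0:Int) ≤ k))
            rw [pvF_neg_some k hk]
            have := h1 hk j hj
            have := pvF_neg_some k hk cs j
            have := hcA1
            omega
          · have hterm : T'.getD j 0 + pvF k cs (some j) ≤ A1 := pvle_rmax 26 _ j hj
            rw [hT'get j hj, if_neg hjc] at hterm
            exact hterm
      · rw [pvF_cons_none]
        apply max_le
        · have := pvF_nonneg k cs (some c)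
          have := hcA1
          apply le_max_of_le_left
          omega
        · exact le_max_of_le_right le_rfl

-- ===== A-side: the concrete fold maintains the abstract table =====
def pvInvT (k : Int) (n m : Nat) (dp last T : List Int) : Prop :=
  dp.length = n ∧ last.length = 26 ∧ T.length = 26 ∧
  (∀ j : Nat, j < 26 →
    (last.getD j 0 = -1 ∧ T.getD j 0 = 0) ∨
    (∃ p : Nat, p < m ∧ last.getD j 0 = (p : Int) ∧ dp.getD p 0 = T.getD j 0 ∧
      1 ≤ T.getD j 0)) ∧
  (∀ p : Nat, p < m → 1 ≤ dp.getD p 0) ∧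
  (k < 0 → ∀ j, j < 26 → T.getD j 0 ≤ 1) ∧
  (dp.take m).foldl max 0 = pvRmax 26 (fun j => T.getD j 0)

theorem pv_take_set (xs : List Int) (m : Nat) (v : Int) (h : m < xs.length) :
    (xs.set m v).take (m+1) = xs.take m ++ [v] := by
  rw [List.take_add_one, List.take_set, List.set_eq_of_length_le (by simp)]
  simp [List.getElem?_set_self h]

theorem pv_getD_mem {α : Type} (xs : List α) (m : Nat) (d : α) (h : m < xs.length) :
    xs.getD m d ∈ xs := by
  rw [List.getD_eq_getElem xs d h]; exact List.getElem_mem h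

theorem pv_inner_eq (W : List Int) (dp last : List Int) (m : Nat) (hm : m < dp.length)
    (hW : ∀ j ∈ W, PySem.List.pyGetD last j 0 ≠ -1 →
       ∃ p : Nat, p < dp.length ∧ p ≠ m ∧ PySem.List.pyGetD last j 0 = (p : Int)) :
    ∀ a, W.foldl (pvInnerA (m : Int) last) (PySem.List.pySetD dp (m : Int) a)
      = PySem.List.pySetD dp (m : Int)
          (List.foldl max a
            ((W.filter (fun j => decide (PySem.List.pyGetD last j 0 ≠ -1))).map
              (fun j => PySem.List.pyGetD dp (PySem.List.pyGetD last j 0) 0 + 1))) := by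
  induction W with
  | nil => intro a; simp
  | cons j W ih =>
    intro a
    have ih' := ih (fun x hx => hW x (by simp [hx]))
    by_cases hj : PySem.List.pyGetD last j 0 ≠ -1
    · obtain ⟨p, hp, hpm, hpe⟩ := hW j (by simp) hj
      have g1 : PySem.List.pyGetD (PySem.List.pySetD dp (m : Int) a) (m : Int) 0 = a := by
        rw [PySem.List.pyGetD_pySetD_natCast dp m m a 0 hm]; simp
      have g2 : PySem.List.pyGetD (PySem.List.pySetD dp (m : Int) a) (p : Int) 0
          = PySem.List.pyGetD dp (p : Int) 0 := by
        rw [PySem.List.pyGetD_pySetD_natCast dp m p a 0 hm]; simp [hpm]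
      have g3 : ∀ v : Int, PySem.List.pySetD (PySem.List.pySetD dp (m : Int) a) (m : Int) v
          = PySem.List.pySetD dp (m : Int) v := by
        intro v; simp [PySem.List.pySetD_natCast, List.set_set]
      have hpne : ((p : Int)) ≠ -1 := by omega
      simp only [List.foldl_cons, List.filter_cons, pvInnerA, hpe, if_pos hpne,
        hpne, decide_true, if_pos rfl, g1, g2, g3]
      rw [ih' (max a (PySem.List.pyGetD dp (p : Int) 0 + 1)),
        if_pos (decide_eq_true hpne), List.map_cons, List.foldl_cons, hpe]
    · simp only [List.foldl_cons, List.filter_cons, pvInnerA, if_neg hj, hj, decide_false,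
        if_neg (by simp : ¬ (false = true))]
      exact ih' a

theorem pv_stepA_inv (l : List Char) (k : Int) (n m : Nat) (dp last T : List Int)
    (hn : n = l.length) (hm : m < n)
    (hlc : ∀ c ∈ l, 97 ≤ c.toNat ∧ c.toNat ≤ 122)
    (hInv : pvInvT k n m dp last T) :
    pvInvT k n (m + 1) (pvStepA l k (dp, last) (m : Int)).1 (pvStepA l k (dp, last) (m : Int)).2
      (pvTStep k T ((l.getD m ' ').toNat - 97)) := by
  obtain ⟨hdp, hlast, hT, hjs, hpos, hle1, hmax⟩ := hInv
  have hmdp : m < dp.length := by omega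
  have hnnT : ∀ j, j < 26 → 0 ≤ T.getD j 0 := by
    intro j hj
    rcases hjs j hj with ⟨_, h0⟩ | ⟨p, _, _, _, h1⟩ <;> omega
  set c := l.getD m ' ' with hc
  have hc97 : 97 ≤ c.toNat ∧ c.toNat ≤ 122 := hlc c (pv_getD_mem l m ' ' (by omega))
  set cN : Nat := c.toNat - 97 with hcNdef
  have hcN : cN < 26 := by omega
  have hcast : ((c.toNat : Int) - 97) = (cN : Int) := by omega
  set W := PySem.List.pyRange (max 0 ((cN : Int) - k)) (min 26 ((cN : Int) + k + 1)) 1 with hWdef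
  have hWmem : ∀ j ∈ W, ∃ jN : Nat, jN < 26 ∧ j = (jN : Int) ∧
      |((jN : Int)) - ((cN : Int))| ≤ k := by
    intro j hj
    obtain ⟨h0, h26, hok⟩ := (pv_mem_window k cN hcN j).mp hj
    refine ⟨j.toNat, by omega, by omega, ?_⟩
    rw [show ((j.toNat : Nat) : Int) = j by omega]
    exact hok
  have hWpre : ∀ j ∈ W, PySem.List.pyGetD last j 0 ≠ -1 →
      ∃ p : Nat, p < dp.length ∧ p ≠ m ∧ PySem.List.pyGetD last j 0 = (p : Int) := by
    intro j hjW hne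
    obtain ⟨jN, hj26, hjcast, _⟩ := hWmem j hjW
    subst hjcast
    rw [PySem.List.pyGetD_natCast] at hne ⊢
    rcases hjs jN hj26 with ⟨h1, _⟩ | ⟨p, hpm, h2, _, _⟩
    · exact absurd h1 hne
    · exact ⟨p, by omega, by omega, h2⟩
  set LA := ((W.filter (fun j => decide (PySem.List.pyGetD last j 0 ≠ -1))).map
      (fun j => PySem.List.pyGetD dp (PySem.List.pyGetD last j 0) 0 + 1)) with hLAdef
  set vA := List.foldl max 1 LA with hvAdef
  have hstepA : pvStepA l k (dp, last) (m : Int)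
      = (PySem.List.pySetD dp (m : Int) vA, PySem.List.pySetD last (cN : Int) (m : Int)) := by
    simp only [pvStepA]
    rw [PySem.List.pyGetD_natCast, ← hc, hcast]
    rw [pv_inner_eq W dp last m hmdp hWpre 1]
  -- the concrete window pass computes exactly 1 + the abstract window-read max
  have hLA : vA = 1 + pvW k T cN := by
    apply le_antisymm
    · apply pv_foldl_max_le
      · have := pvW_nonneg k T cN
        omega
      · intro x hx
        obtain ⟨j, hjf, rfl⟩ := List.mem_map.mp hx
        have hjW := List.mem_of_mem_filter hjf
        have hne := of_decide_eq_true (List.mem_filter.mp hjf).2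
        obtain ⟨jN, hj26, hjcast, hok⟩ := hWmem j hjW
        subst hjcast
        rw [PySem.List.pyGetD_natCast] at hne ⊢
        rcases hjs jN hj26 with ⟨h1, _⟩ | ⟨p, hpm, h2, hdT, h1T⟩
        · exact absurd h1 hne
        · rw [h2, PySem.List.pyGetD_natCast, hdT]
          have := pv_window_le k T cN hcN jN hj26 hok
          omega
    · have hbase : (1 : Int) ≤ vA := (PySem.List.le_foldl_max LA 1).1
      rcases pvW_cases k T cN hcN with h0 | ⟨jN, hj26, hok, he⟩
      · omega
      · rcases hjs jN hj26 with ⟨_, h0⟩ | ⟨p, hpm, h2, hdT, h1T⟩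
        · omega
        · have hmemW : ((jN : Int)) ∈ W := (pv_mem_window k cN hcN _).mpr ⟨by omega, by omega, hok⟩
          have hLAmem : T.getD jN 0 + 1 ∈ LA := by
            rw [hLAdef]
            apply List.mem_map.mpr
            refine ⟨(jN : Int), List.mem_filter.mpr ⟨hmemW, ?_⟩, ?_⟩
            · apply decide_eq_true
              rw [PySem.List.pyGetD_natCast, h2]
              omega
            · rw [PySem.List.pyGetD_natCast, h2, PySem.List.pyGetD_natCast, hdT]
          have := (PySem.List.le_foldl_max LA 1).2 _ hLAmem
          omega
  have hdp2 : PySem.List.pySetD dp (m : Int) vA = dp.set m vA := by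
    simp [PySem.List.pySetD_natCast]
  have hlast2 : PySem.List.pySetD last (cN : Int) (m : Int) = last.set cN ((m : Int)) := by
    simp [PySem.List.pySetD_natCast]
  have hvA1 : 1 ≤ vA := by
    have := pvW_nonneg k T cN
    omega
  have hT2get : ∀ j, j < 26 → (pvTStep k T cN).getD j 0 =
      if j = cN then vA else T.getD j 0 := by
    intro j hj
    simp only [pvTStep]
    by_cases hjc : j = cN
    · rw [if_pos hjc, hjc, ← hLA]
      simp [List.getD, List.getElem?_set_self (by omega : cN < T.length)]
    · rw [if_neg hjc]
      simp [List.getD, List.getElem?_set_ne (by omega : cN ≠ j)]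
  rw [hstepA]
  refine ⟨by simp [hdp2, hdp], by simp [hlast2, hlast], by simp [pvTStep, hT], ?_, ?_, ?_, ?_⟩
  · intro j hj
    simp only [hdp2, hlast2]
    by_cases hjc : j = cN
    · right
      refine ⟨m, by omega, ?_, ?_, ?_⟩
      · rw [hjc]
        simp [List.getD, List.getElem?_set_self (by omega : cN < last.length)]
      · rw [hT2get j hj, if_pos hjc]
        simp [List.getD, List.getElem?_set_self (by omega : m < dp.length)]
      · rw [hT2get j hj, if_pos hjc]
        exact hvA1
    · rw [hT2get j hj, if_neg hjc]
      have hlne : (last.set cN ((m : Int))).getD j 0 = last.getD j 0 := by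
        simp [List.getD, List.getElem?_set_ne (by omega : cN ≠ j)]
      rcases hjs j hj with ⟨h1, h2⟩ | ⟨p, hpm, h3, h4, h5⟩
      · exact Or.inl ⟨by rw [hlne]; exact h1, h2⟩
      · refine Or.inr ⟨p, by omega, by rw [hlne]; exact h3, ?_, h5⟩
        rw [← h4]
        simp [List.getD, List.getElem?_set_ne (by omega : m ≠ p)]
  · intro p hp
    simp only [hdp2]
    by_cases hpm : p = m
    · subst hpm
      simp only [List.getD, List.getElem?_set_self (by omega : p < dp.length)]
      simpa using hvA1
    · simp only [List.getD, List.getElem?_set_ne (by omega : m ≠ p)]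
      exact hpos p (by omega)
  · intro hk j hj
    rw [hT2get j hj]
    split_ifs
    · rw [hLA, pvW_neg k hk]; omega
    · exact hle1 hk j hj
  · simp only [hdp2]
    rw [pv_take_set dp m vA hmdp, List.foldl_append, hmax]
    have hupd := pvRmax_update 26 (fun j => T.getD j 0) (fun j => (pvTStep k T cN).getD j 0)
      cN vA hcN (by omega) hT2get (by rw [hLA]; exact pvW_Tc_le k T cN hcN hle1) hnnT
    rw [hupd]
    simp

theorem pv_runA (l : List Char) (k : Int) (n : Nat) (hn : n = l.length)
    (hlc : ∀ c ∈ l, 97 ≤ c.toNat ∧ c.toNat ≤ 122) :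
    ∀ (d m : Nat) (st : List Int × List Int) (T : List Int),
      m + d = n → pvInvT k n m st.1 st.2 T →
      pvInvT k n n
        ((PySem.List.pyRange (m : Int) (n : Int) 1).foldl (pvStepA l k) st).1
        ((PySem.List.pyRange (m : Int) (n : Int) 1).foldl (pvStepA l k) st).2
        (((l.drop m).map (fun c => c.toNat - 97)).foldl (pvTStep k) T) := by
  intro d
  induction d with
  | zero =>
    intro m st T hmn hInv
    have hm : m = n := by omega
    subst hm
    rw [PySem.List.pyRange_one_eq_nil (by omega), List.drop_eq_nil_of_le (by omega)]
    simpa using hInv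
  | succ d ih =>
    intro m st T hmn hInv
    have hm : m < n := by omega
    have hml : m < l.length := by omega
    rw [PySem.List.pyRange_one_cons (by exact_mod_cast hm)]
    rw [List.drop_eq_getElem_cons hml]
    simp only [List.foldl_cons, List.map_cons]
    have hcast : ((m : Int) + 1) = (((m + 1 : Nat)) : Int) := by push_cast; ring
    rw [hcast]
    have hget : l[m] = l.getD m ' ' := (List.getD_eq_getElem l ' ' hml).symm
    rw [hget]
    have hstep := pv_stepA_inv l k n m st.1 st.2 T hn hm hlc hInv
    exact ih (m + 1) (pvStepA l k (st.1, st.2) (m : Int))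
      (pvTStep k T ((l.getD m ' ').toNat - 97)) (by omega) hstep

-- ===== B-side: the state vector represents pvF of the processed suffix =====
def pvReprB (k : Int) (cs : List Nat) (g : List Int) : Prop :=
  g.length = 27 ∧ (∀ j : Nat, j < 26 → g.getD j 0 = pvF k cs (some j)) ∧
    g.getD 26 0 = pvF k cs none

theorem pv_innerB_getD (k ci take : Int) (g : List Int) (x : Int) (hx0 : 0 ≤ x)
    (hxl : x.toNat < g.length) :
    (pvInnerB k ci take g x).length = g.length ∧
    ∀ j : Nat, (pvInnerB k ci take g x).getD j 0 =
      if (j : Int) = x ∧ (x = 26 ∨ |x - ci| ≤ k) then max (g.getD j 0) take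
      else g.getD j 0 := by
  have hget : PySem.List.pyGetD g x 0 = g.getD x.toNat 0 := by
    conv_lhs => rw [show x = ((x.toNat : Nat) : Int) by omega]
    rw [PySem.List.pyGetD_natCast]
  have hset : PySem.List.pySetD g x take = g.set x.toNat take := by
    conv_lhs => rw [show x = ((x.toNat : Nat) : Int) by omega]
    rw [PySem.List.pySetD_natCast]
  constructor
  · unfold pvInnerB
    split_ifs <;> simp [hset]
  · intro j
    unfold pvInnerB
    by_cases hC : ((x == 26) || decide (|x - ci| ≤ k)) = true
    · rw [if_pos hC]
      have hCp : x = 26 ∨ |x - ci| ≤ k := by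
        rcases Bool.or_eq_true_iff.mp hC with h | h
        · exact Or.inl (by exact_mod_cast beq_iff_eq.mp h)
        · exact Or.inr (of_decide_eq_true h)
      by_cases ht : take > PySem.List.pyGetD g x 0
      · rw [if_pos ht, hset]
        by_cases hjx : (j : Int) = x
        · rw [if_pos ⟨hjx, hCp⟩, show j = x.toNat by omega]
          simp only [List.getD, List.getElem?_set_self hxl, Option.getD_some]
          exact (max_eq_right (by rw [hget] at ht; simp only [List.getD] at ht ⊢; omega)).symm
        · rw [if_neg (by tauto)]
          simp [List.getD, List.getElem?_set_ne (show x.toNat ≠ j by omega)]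
      · rw [if_neg ht]
        by_cases hjx : (j : Int) = x
        · rw [if_pos ⟨hjx, hCp⟩, show j = x.toNat by omega,
            max_eq_left (by rw [hget] at ht; omega)]
        · rw [if_neg (by tauto)]
    · rw [if_neg hC]
      have hCp : ¬(x = 26 ∨ |x - ci| ≤ k) := by
        intro h
        apply hC
        rcases h with h | h
        · simp [h]
        · simp [h]
      rw [if_neg (by tauto)]

theorem pv_innerB_fold (k ci take : Int) (L : List Int) :
    ∀ (g : List Int), L.Nodup → (∀ x ∈ L, 0 ≤ x ∧ x.toNat < g.length) →
    (L.foldl (pvInnerB k ci take) g).length = g.length ∧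
    ∀ j : Nat, j < g.length →
      (L.foldl (pvInnerB k ci take) g).getD j 0 =
        if (j : Int) ∈ L ∧ ((j : Int) = 26 ∨ |(j : Int) - ci| ≤ k)
        then max (g.getD j 0) take else g.getD j 0 := by
  induction L with
  | nil =>
    intro g _ _
    exact ⟨rfl, by intro j hj; simp⟩
  | cons x L ih =>
    intro g hnd hb
    have hx := hb x (by simp)
    obtain ⟨hlen1, hget1⟩ := pv_innerB_getD k ci take g x hx.1 hx.2
    have hnd' := List.nodup_cons.mp hnd
    obtain ⟨hlenF, hgetF⟩ := ih (pvInnerB k ci take g x) hnd'.2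
      (by intro y hy; rw [hlen1]; exact hb y (List.mem_cons_of_mem _ hy))
    constructor
    · rw [List.foldl_cons, hlenF, hlen1]
    · intro j hj
      rw [List.foldl_cons, hgetF j (by rw [hlen1]; exact hj), hget1 j]
      by_cases hjL : (j : Int) ∈ L
      · have hjx : ¬((j : Int) = x) := fun h => hnd'.1 (h ▸ hjL)
        rw [if_neg (show ¬((j : Int) = x ∧ (x = 26 ∨ |x - ci| ≤ k)) from fun h => hjx h.1)]
        by_cases hcj : ((j : Int) = 26 ∨ |(j : Int) - ci| ≤ k)
        · rw [if_pos ⟨hjL, hcj⟩, if_pos ⟨List.mem_cons_of_mem _ hjL, hcj⟩]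
        · rw [if_neg (show ¬((j : Int) ∈ L ∧ ((j : Int) = 26 ∨ |(j : Int) - ci| ≤ k)) from
              fun h => hcj h.2),
            if_neg (show ¬((j : Int) ∈ x :: L ∧ ((j : Int) = 26 ∨ |(j : Int) - ci| ≤ k)) from
              fun h => hcj h.2)]
      · rw [if_neg (show ¬((j : Int) ∈ L ∧ ((j : Int) = 26 ∨ |(j : Int) - ci| ≤ k)) from
            fun h => hjL h.1)]
        by_cases hjx : (j : Int) = x
        · have hmem : (j : Int) ∈ x :: L := by simp [hjx]
          by_cases hcx : (x = 26 ∨ |x - ci| ≤ k)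
          · have hcj : ((j : Int) = 26 ∨ |(j : Int) - ci| ≤ k) := by rw [hjx]; exact hcx
            rw [if_pos ⟨hjx, hcx⟩, if_pos ⟨hmem, hcj⟩]
          · have hcj : ¬((j : Int) = 26 ∨ |(j : Int) - ci| ≤ k) := by rw [hjx]; exact hcx
            rw [if_neg (show ¬((j : Int) = x ∧ (x = 26 ∨ |x - ci| ≤ k)) from fun h => hcx h.2),
              if_neg (show ¬((j : Int) ∈ x :: L ∧ ((j : Int) = 26 ∨ |(j : Int) - ci| ≤ k)) from
                fun h => hcj h.2)]
        · rw [if_neg (show ¬((j : Int) = x ∧ (x = 26 ∨ |x - ci| ≤ k)) from fun h => hjx h.1),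
            if_neg (show ¬((j : Int) ∈ x :: L ∧ ((j : Int) = 26 ∨ |(j : Int) - ci| ≤ k)) from by
              simp only [List.mem_cons]
              tauto)]

theorem pv_stepB_repr (k : Int) (cs : List Nat) (g : List Int) (c : Char)
    (hc : 97 ≤ c.toNat ∧ c.toNat ≤ 122) (h : pvReprB k cs g) :
    pvReprB k ((c.toNat - 97) :: cs) (pvStepBalt k g c) := by
  obtain ⟨hlen, hsome, hnone⟩ := h
  set cN : Nat := c.toNat - 97 with hcNdef
  have hcN : cN < 26 := by omega
  have hci : ((c.toNat : Int)) - 97 = ((cN : Nat) : Int) := by omega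
  have htake : 1 + PySem.List.pyGetD g (((c.toNat : Int)) - 97) 0 = 1 + pvF k cs (some cN) := by
    rw [hci, PySem.List.pyGetD_natCast, hsome cN hcN]
  have hnodup : (PySem.List.pyRange 0 27 1).Nodup := PySem.List.nodup_pyRange_one 0 27
  have hbound : ∀ x ∈ PySem.List.pyRange 0 27 1, 0 ≤ x ∧ x.toNat < g.length := by
    intro x hx
    have := PySem.List.mem_pyRange_one.mp hx
    constructor <;> omega
  obtain ⟨hlenF, hgetF⟩ := pv_innerB_fold k (((c.toNat : Int)) - 97)
    (1 + PySem.List.pyGetD g (((c.toNat : Int)) - 97) 0) (PySem.List.pyRange 0 27 1) g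
    hnodup hbound
  have hres : ∀ j : Nat, j < 27 → (pvStepBalt k g c).getD j 0 =
      if (j : Int) ∈ PySem.List.pyRange 0 27 1 ∧
          ((j : Int) = 26 ∨ |(j : Int) - (((c.toNat : Int)) - 97)| ≤ k)
      then max (g.getD j 0) (1 + PySem.List.pyGetD g (((c.toNat : Int)) - 97) 0)
      else g.getD j 0 := by
    intro j hj
    simp only [pvStepBalt]
    exact hgetF j (by omega)
  refine ⟨by simp only [pvStepBalt]; rw [hlenF, hlen], ?_, ?_⟩
  · intro j hj
    rw [hres j (by omega), htake]
    have hjmem : ((j : Int)) ∈ PySem.List.pyRange 0 27 1 :=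
      PySem.List.mem_pyRange_one.mpr ⟨by omega, by omega⟩
    have hj26 : ¬((j : Int) = 26) := by omega
    rw [pvF_cons_some]
    by_cases hok : |((j : Int)) - ((cN : Int))| ≤ k
    · rw [if_pos hok, if_pos ⟨hjmem, Or.inr (by rw [hci]; exact hok)⟩, hsome j (by omega)]
      exact max_comm _ _
    · rw [if_neg hok, if_neg (by rw [hci]; tauto), hsome j (by omega)]
  · rw [hres 26 (by omega), htake]
    have hmem : ((26 : Nat) : Int) ∈ PySem.List.pyRange 0 27 1 :=
      PySem.List.mem_pyRange_one.mpr ⟨by omega, by omega⟩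
    rw [if_pos ⟨hmem, Or.inl (by norm_num)⟩, hnone, pvF_cons_none]
    exact max_comm _ _

theorem pv_runB (k : Int) (r : List Char) (hr : ∀ c ∈ r, 97 ≤ c.toNat ∧ c.toNat ≤ 122) :
    ∀ (cs : List Nat) (g : List Int), pvReprB k cs g →
      pvReprB k ((r.map (fun c => c.toNat - 97)).reverse ++ cs) (r.foldl (pvStepBalt k) g) := by
  induction r with
  | nil => intro cs g h; simpa using h
  | cons c r ih =>
    intro cs g h
    have hstep := pv_stepB_repr k cs g c (hr c (by simp)) h
    have := ih (fun x hx => hr x (by simp [hx])) ((c.toNat - 97) :: cs) (pvStepBalt k g c) hstep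
    simpa [List.append_assoc] using this

-- ===== VERDICT (by name: the statement is the Claim_ definition above) =====
theorem pv_getD_replicate0 (j nn : Nat) : (List.replicate nn (0 : Int)).getD j 0 = 0 := by
  rw [List.getD_eq_getElem?_getD, List.getElem?_replicate]
  split <;> rfl

theorem longestIdealString_spec : Claim_equal_longestIdealString := by
  intro s k hdom hpre
  unfold Spec_longestIdealString
  obtain ⟨hne, hlcb⟩ := hpre
  have hlc : ∀ c ∈ s.toList, 97 ≤ c.toNat ∧ c.toNat ≤ 122 := by
    intro c hc
    have := List.all_eq_true.mp hlcb c hc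
    simp only [Bool.and_eq_true, decide_eq_true_eq] at this
    exact this
  set l := s.toList with hl
  set n := l.length with hn
  set cs := l.map (fun c => c.toNat - 97) with hcsdef
  have hcs26 : ∀ c ∈ cs, c < 26 := by
    intro c hc
    obtain ⟨ch, hch, rfl⟩ := List.mem_map.mp hc
    have := hlc ch hch
    omega
  -- B's fold computes the take/skip recursion pvF
  have hInitB : pvReprB k [] (List.replicate 27 0) := by
    refine ⟨by simp, ?_, ?_⟩
    · intro j hj
      rw [pv_getD_replicate0]
      simp [pvF]
    · rw [pv_getD_replicate0]
      simp [pvF]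
  have hrB := pv_runB k l.reverse (by intro c hc; exact hlc c (List.mem_reverse.mp hc)) []
      (List.replicate 27 0) hInitB
  rw [List.append_nil, List.map_reverse, List.reverse_reverse] at hrB
  have hBval : longestIdealString_alt s k = pvF k cs none := by
    simp only [longestIdealString_alt, ← hl]
    rw [show (26 : Int) = ((26 : Nat) : Int) by norm_num, PySem.List.pyGetD_natCast]
    exact hrB.2.2
  -- A's fold maintains the abstract forward table
  have hInitA : pvInvT k n 0 (List.replicate n 0) (List.replicate 26 (-1)) (List.replicate 26 0) := by
    refine ⟨by simp, by simp, by simp, ?_, by omega, ?_, ?_⟩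
    · intro j hj
      left
      constructor
      · rw [List.getD_eq_getElem?_getD, List.getElem?_replicate, if_pos hj]
        rfl
      · rw [pv_getD_replicate0]
    · intro _ j _
      rw [pv_getD_replicate0]
      omega
    · simp only [List.take_zero, List.foldl_nil]
      refine (le_antisymm ?_ (pvRmax_nonneg _ _)).symm
      apply pvRmax_le _ _ _ le_rfl
      intro j hj
      rw [pv_getD_replicate0]
  have hrA := pv_runA l k n hn hlc n 0 (List.replicate n 0, List.replicate 26 (-1))
      (List.replicate 26 0) (by omega) hInitA
  simp only [Nat.cast_zero, List.drop_zero, ← hcsdef] at hrA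
  obtain ⟨hlen, _, _, _, hposA, _, hmaxA⟩ := hrA
  -- exchange: the forward table max is pvF
  have hex := pv_exchange k cs hcs26 (List.replicate 26 0) (by simp)
      (fun j _ => by rw [pv_getD_replicate0]) (fun _ j _ => by rw [pv_getD_replicate0]; omega)
  have h1 : pvRmax 26 (fun j => (List.replicate 26 (0 : Int)).getD j 0 + pvF k cs (some j))
      ≤ pvF k cs none := by
    apply pvRmax_le _ _ _ (pvF_nonneg k cs none)
    intro j hj
    rw [pv_getD_replicate0]
    have := pvF_le_none k cs j
    omega
  rw [max_eq_right h1] at hex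
  -- read off A's return value
  rw [hBval]
  simp only [longestIdealString, ← hl, ← hn]
  set dpf := ((PySem.List.pyRange 0 (n : Int) 1).foldl (pvStepA l k)
      (List.replicate n 0, List.replicate 26 (-1))).1 with hdpfdef
  have htake : dpf.take n = dpf := by rw [← hlen, List.take_length]
  rw [htake] at hmaxA
  have hn0 : 0 < n := by
    rw [hn]
    exact List.length_pos_iff.mpr (by simpa using hne)
  cases hdpf : dpf with
  | nil =>
    rw [hdpf] at hlen
    simp at hlen
    omega
  | cons x t =>
    rw [PySem.List.max?_id_cons, Option.getD_some]
    have hx1 : 1 ≤ x := by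
      have h0 := hposA 0 hn0
      rw [hdpf] at h0
      simpa [List.getD] using h0
    rw [hdpf] at hmaxA
    rw [List.foldl_cons, max_eq_right (by omega : (0 : Int) ≤ x)] at hmaxA
    rw [hmaxA, hex]
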